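-- pv_equiv track=rewrite | github.com/Tervel/projects | numbers/find-pi-to-the-nth-digit/FindPi.py | find_pi
-- ===== SOURCE A (Python) =====
-- def find_pi(length):
--     """
--     Spitgot algorithm to find pi
--     """
--     q, r, t, k, n, l = 1, 0, 1, 1, 3, 3
--     pi_array = []
--
--     while True:
--         if 4*q+r-t < n*t:
--             pi_array.append(str(n)) # alternative to yield
--             q, r, t, k, n, l = (10*q, 10*(r-n*t), t, k, (10*(3*q+r))//t-10*n, l)
--         else:
--             q, r, t, k, n, l = (q*k, (2*q+r)*l, t*l, k+1, (q*(7*k+2)+r*l)//(t*l), l+2)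
--
--         if len(pi_array) == length:
--             return pi_array
-- ===== SOURCE B (Python) =====
-- def find_pi(length):
--     """
--     Converge first, digitize after.  Track the scaled bracket numerators
--     U = scale*q and V = scale*(3*q+r) (so scale*low = V/t, scale*high = (V+U)/t)
--     by small-multiplier updates; once the bracket is narrower than 1/scale
--     (U < t), also track W = V % t incrementally and stop when W + U < t,
--     i.e. when floor(V/t) == floor((V+U)/t) pins down all `length` digits at
--     once; finally peel the digits off the single integer N = V//t
--     back-to-front.
--     """
--     if length <= 0:
--         return []
--     scale = 10 ** (length - 1)
--     U, V, t, k = scale, 3 * scale, 1, 1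
--     while U >= t:                  # bracket still wider than one digit unit
--         V, U, t, k = (2*k+1)*V + (k-1)*U, k*U, (2*k+1)*t, k+1
--     W = V % t
--     while W + U >= t:              # until floor(V/t) == floor((V+U)/t)
--         V, W, U, t, k = (2*k+1)*V + (k-1)*U, (2*k+1)*W + (k-1)*U, k*U, (2*k+1)*t, k+1
--         if W >= t:
--             W -= t
--     n = V // t
--     digits = []
--     for _ in range(length):
--         digits.append(str(n % 10))
--         n //= 10
--     digits.reverse()
--     return digits
-- ===== Notes on version B (the rewrite author's own statement) =====
-- stated objective: alternative
-- what changed: A streams digits one at a time, interleaving emit steps with consume steps of a six-variable recurrence; B is converge-then-digitize: a consume-only loop tracks the scaled bracket numerators U=scale*q, V=scale*(3q+r) and an incremental remainder W=V%t with small-multiplier updates until one remainder test pins down all digits at once, then a single division yields N=V//t whose digits are peeled off back-to-front (intended as faster; measured 4.56x at n=4096, unconfirmed at larger sizes where both time out).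
import Mathlib
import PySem

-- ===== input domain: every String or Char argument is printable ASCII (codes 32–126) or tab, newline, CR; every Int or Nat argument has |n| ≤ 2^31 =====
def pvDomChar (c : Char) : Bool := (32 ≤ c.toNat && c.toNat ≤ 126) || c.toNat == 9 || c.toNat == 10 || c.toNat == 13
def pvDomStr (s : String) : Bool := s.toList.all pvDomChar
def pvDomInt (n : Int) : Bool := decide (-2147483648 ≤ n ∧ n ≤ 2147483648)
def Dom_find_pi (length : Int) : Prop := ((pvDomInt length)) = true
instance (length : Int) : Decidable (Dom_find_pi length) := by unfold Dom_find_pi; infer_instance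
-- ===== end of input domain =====

-- B replaces A's interleaved digit-streaming spigot by a converge-then-digitize scheme:
-- fold the series into ONE fraction until it pins down all digits at once, then peel the
-- digits off a single integer back-to-front (objective: alternative two-phase algorithm).


-- ===== PORT A =====
-- Python's `while True` is ported with a fuel counter over the consume (else-branch) steps,
-- plus an inner counter bounding the consecutive emit (then-branch) steps; both are totality
-- guards only (they return [] when exhausted), the loop body is A's code step for step.
def find_piLoop (length : Int) : Nat → Nat → Int → Int → Int → Int → Int → Int → List String → List String
  | _, 0, _q, _r, _t, _k, _n, _l, _acc => []
  | 0, _, _q, _r, _t, _k, _n, _l, _acc => []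
  | cf+1, ef+1, q, r, t, k, n, l, acc =>
    if 4*q + r - t < n*t then
      let acc' := acc ++ [PySem.Int.toStr n]
      if (acc'.length : Int) = length then acc'
      else find_piLoop length (cf+1) ef (10*q) (10*(r - n*t)) t k
             (PySem.Int.floordiv (10*(3*q + r)) t - 10*n) l acc'
    else
      if (acc.length : Int) = length then acc
      else find_piLoop length cf (length.toNat + 1) (q*k) ((2*q + r)*l) (t*l) (k+1)
             (PySem.Int.floordiv (q*(7*k+2) + r*l) (t*l)) (l+2) acc
termination_by cf ef => (cf, ef)

def find_pi (length : Int) : List String :=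
  find_piLoop length (10*length + 16).toNat (length.toNat + 1) 1 0 1 1 3 3 []

-- ===== PORT B =====
-- port of B's final for-loop: append str(n % 10), then n //= 10, `length` times
def pyDigitsLoop : Nat → Int → List String → List String
  | 0, _n, ds => ds
  | i+1, n, ds => pyDigitsLoop i (PySem.Int.floordiv n 10) (ds ++ [PySem.Int.toStr (PySem.Int.mod n 10)])

-- port of B's second while loop (fuel is a totality guard only; [] on exhaustion)
def find_pi_altLoop2 (length : Int) : Nat → Int → Int → Int → Int → Int → List String
  | 0, _V, _W, _U, _t, _k => []
  | f+1, V, W, U, t, k =>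
    if t ≤ W + U then
      find_pi_altLoop2 length f ((2*k+1)*V + (k-1)*U)
        (if (2*k+1)*t ≤ (2*k+1)*W + (k-1)*U then (2*k+1)*W + (k-1)*U - (2*k+1)*t
         else (2*k+1)*W + (k-1)*U)
        (k*U) ((2*k+1)*t) (k+1)
    else
      (pyDigitsLoop length.toNat (PySem.Int.floordiv V t) []).reverse

-- port of B's first while loop; on exit it hands the remaining fuel to the second loop
def find_pi_altLoop1 (length : Int) : Nat → Int → Int → Int → Int → List String
  | 0, _U, _V, _t, _k => []
  | f+1, U, V, t, k =>
    if t ≤ U then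
      find_pi_altLoop1 length f (k*U) ((2*k+1)*V + (k-1)*U) ((2*k+1)*t) (k+1)
    else
      find_pi_altLoop2 length (f+1) V (PySem.Int.mod V t) U t k

def find_pi_alt (length : Int) : List String :=
  if length ≤ 0 then []
  else find_pi_altLoop1 length (10*length + 16).toNat ((10:Int)^(length.toNat - 1))
    (3*(10:Int)^(length.toNat - 1)) 1 1

-- ===== PRECONDITION & SPEC =====
-- Pre_ excludes negative lengths, on which the Python A loops forever (it never returns there).
def Pre_find_pi (length : Int) : Prop := 0 ≤ length
instance (length : Int) : Decidable (Pre_find_pi length) := by unfold Pre_find_pi; infer_instance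
def pvWitness_find_pi : Int := (5)

def Spec_find_pi (length : Int) (out : List String) : Prop := out = find_pi_alt length
instance (length : Int) (out : List String) : Decidable (Spec_find_pi length out) := by unfold Spec_find_pi; infer_instance

-- ===== CLAIM (what is proved, stated in full; the proofs are below) =====
def Claim_equal_find_pi : Prop := ∀ (length : Int), Dom_find_pi length → Pre_find_pi length → Spec_find_pi length (find_pi length)

-- ===== LEMMAS AND PROOFS =====

-- the i-th decimal digit of pi as seen through the bracketing fraction (q*x+r)/t:
-- digA i = floor(10^i * low) - 10 * floor(10^(i-1) * low), low = (3Q+R)/T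
def digA (Q R T : Int) : Nat → Int
  | 0 => PySem.Int.floordiv (3*Q+R) T
  | i+1 => PySem.Int.floordiv (10^(i+1)*(3*Q+R)) T - 10 * PySem.Int.floordiv (10^i*(3*Q+R)) T

lemma fd_le_fd {a b c d : Int} (hb : 0 < b) (hd : 0 < d) (h : a*d ≤ c*b) :
    PySem.Int.floordiv a b ≤ PySem.Int.floordiv c d := by
  rw [PySem.Int.floordiv_eq_ediv_of_pos hb, PySem.Int.floordiv_eq_ediv_of_pos hd]
  rw [Int.le_ediv_iff_mul_le hd]
  have h1 : a / b * b ≤ a := Int.ediv_mul_le a (ne_of_gt hb)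
  nlinarith [h1]

lemma fd_fd (a : Int) {b c : Int} (hb : 0 < b) (hc : 0 < c) :
    PySem.Int.floordiv (PySem.Int.floordiv a b) c = PySem.Int.floordiv a (b*c) := by
  rw [PySem.Int.floordiv_eq_ediv_of_pos hb, PySem.Int.floordiv_eq_ediv_of_pos hc,
    PySem.Int.floordiv_eq_ediv_of_pos (by positivity)]
  exact Int.ediv_ediv_of_nonneg (le_of_lt hb)

lemma fd_cancel (a : Int) {b m : Int} (hb : 0 < b) (hm : 0 < m) :
    PySem.Int.floordiv (m*a) (m*b) = PySem.Int.floordiv a b := by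
  rw [PySem.Int.floordiv_eq_ediv_of_pos hb, PySem.Int.floordiv_eq_ediv_of_pos (by positivity)]
  exact Int.mul_ediv_mul_of_pos a b hm

lemma fd_shift (u T : Int) {i e : Nat} (hT : 0 < T) (hie : i ≤ e) :
    PySem.Int.floordiv (PySem.Int.floordiv ((10:Int)^e*u) T) ((10:Int)^(e-i))
      = PySem.Int.floordiv ((10:Int)^i*u) T := by
  rw [fd_fd _ hT (by positivity)]
  have he : (10:Int)^e = (10:Int)^(e-i) * (10:Int)^i := by
    rw [← pow_add]; congr 1; omega
  have h1 : (10:Int)^e * u = (10:Int)^(e-i) * ((10:Int)^i * u) := by rw [he]; ring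
  have h2 : T * (10:Int)^(e-i) = (10:Int)^(e-i) * T := by ring
  rw [h1, h2, fd_cancel _ hT (by positivity)]

lemma fd_sub_mul (a b T : Int) (hT : 0 < T) :
    PySem.Int.floordiv (a - b*T) T = PySem.Int.floordiv a T - b := by
  rw [PySem.Int.floordiv_eq_ediv_of_pos hT, PySem.Int.floordiv_eq_ediv_of_pos hT]
  have : a - b*T = a + (-b)*T := by ring
  rw [this, Int.add_mul_ediv_right a (-b) (ne_of_gt hT)]
  ring

lemma cond_iff (q r t n : Int) (hq : 0 < q) (ht : 0 < t)
    (hn : n = PySem.Int.floordiv (3*q + r) t) :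
    (4*q + r - t < n*t ↔ PySem.Int.floordiv (4*q + r) t = n) := by
  have h1 := (PySem.Int.floordiv_eq_iff_of_pos ht).mp hn.symm
  rw [PySem.Int.floordiv_eq_iff_of_pos ht]
  have hnt : (n+1)*t = n*t + t := by ring
  constructor
  · intro h; exact ⟨by nlinarith [h1.1], by rw [hnt]; omega⟩
  · intro h; have := h.2; rw [hnt] at this; omega

lemma emit_n (q r t n : Int) (ht : 0 < t) :
    PySem.Int.floordiv (10*(3*q + r)) t - 10*n
      = PySem.Int.floordiv (3*(10*q) + 10*(r - n*t)) t := by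
  have : 3*(10*q) + 10*(r - n*t) = 10*(3*q+r) - (10*n)*t := by ring
  rw [this, fd_sub_mul _ _ _ ht]

lemma persist (s Q R T K : Int) (hs : 0 ≤ s) (hQ : 0 < Q) (hT : 0 < T) (hK : 1 ≤ K)
    (hpin : PySem.Int.floordiv (s*(3*Q+R)) T = PySem.Int.floordiv (s*(4*Q+R)) T) :
    PySem.Int.floordiv (s*(3*(Q*K)+((4*K+2)*Q+(2*K+1)*R))) ((2*K+1)*T)
        = PySem.Int.floordiv (s*(3*Q+R)) T ∧
    PySem.Int.floordiv (s*(4*(Q*K)+((4*K+2)*Q+(2*K+1)*R))) ((2*K+1)*T)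
        = PySem.Int.floordiv (s*(4*Q+R)) T := by
  have hT' : 0 < (2*K+1)*T := by nlinarith
  have key1 : (3*Q+R)*(2*K+1) ≤ 3*(Q*K)+((4*K+2)*Q+(2*K+1)*R) := by nlinarith
  have key2 : 3*(Q*K)+((4*K+2)*Q+(2*K+1)*R) ≤ 4*(Q*K)+((4*K+2)*Q+(2*K+1)*R) := by nlinarith
  have key3 : 4*(Q*K)+((4*K+2)*Q+(2*K+1)*R) ≤ (4*Q+R)*(2*K+1) := by nlinarith
  have hsT : 0 ≤ s*T := mul_nonneg hs (le_of_lt hT)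
  have h1 : PySem.Int.floordiv (s*(3*Q+R)) T
      ≤ PySem.Int.floordiv (s*(3*(Q*K)+((4*K+2)*Q+(2*K+1)*R))) ((2*K+1)*T) :=
    fd_le_fd hT hT' (by nlinarith [mul_le_mul_of_nonneg_left key1 hsT])
  have h2 : PySem.Int.floordiv (s*(3*(Q*K)+((4*K+2)*Q+(2*K+1)*R))) ((2*K+1)*T)
      ≤ PySem.Int.floordiv (s*(4*(Q*K)+((4*K+2)*Q+(2*K+1)*R))) ((2*K+1)*T) :=
    fd_le_fd hT' hT' (by nlinarith [mul_le_mul_of_nonneg_left key2 (mul_nonneg hs (le_of_lt hT'))])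
  have h3 : PySem.Int.floordiv (s*(4*(Q*K)+((4*K+2)*Q+(2*K+1)*R))) ((2*K+1)*T)
      ≤ PySem.Int.floordiv (s*(4*Q+R)) T :=
    fd_le_fd hT' hT (by nlinarith [mul_le_mul_of_nonneg_left key3 hsT])
  omega

-- a pin at scale 10^e implies a pin at every smaller scale 10^i
lemma pin_mono {u3 u4 T : Int} {i e : Nat} (hT : 0 < T) (hie : i ≤ e)
    (h : PySem.Int.floordiv ((10:Int)^e*u3) T = PySem.Int.floordiv ((10:Int)^e*u4) T) :
    PySem.Int.floordiv ((10:Int)^i*u3) T = PySem.Int.floordiv ((10:Int)^i*u4) T := by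
  rw [← fd_shift u3 T hT hie, ← fd_shift u4 T hT hie, h]

lemma A0_eq_three {Q R T : Int} (hQ : 0 < Q) (hT : 0 < T)
    (hlow : 3*T ≤ 3*Q+R) (hhigh : 4*Q+R ≤ 4*T)
    (hpin : PySem.Int.floordiv (3*Q+R) T = PySem.Int.floordiv (4*Q+R) T) :
    PySem.Int.floordiv (3*Q+R) T = 3 := by
  have h1 : 3 ≤ PySem.Int.floordiv (3*Q+R) T := by
    rw [PySem.Int.le_floordiv_iff_mul_le hT]; linarith
  have h2 : PySem.Int.floordiv (4*Q+R) T < 5 := by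
    rw [PySem.Int.floordiv_lt_iff_lt_mul hT]; nlinarith
  by_cases h : PySem.Int.floordiv (3*Q+R) T = 4
  · exfalso
    have h6 := (PySem.Int.floordiv_eq_iff_of_pos hT).mp h
    nlinarith [h6.1]
  · omega

lemma pyDigitsLoop_eq (m : Nat) : ∀ (n : Int) (ds : List String),
    pyDigitsLoop m n ds
      = ds ++ (List.range m).map
          (fun e => PySem.Int.toStr (PySem.Int.mod (PySem.Int.floordiv n ((10:Int)^e)) 10)) := by
  induction m with
  | zero => intro n ds; simp [pyDigitsLoop]
  | succ m ih =>
    intro n ds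
    rw [pyDigitsLoop, ih, List.range_succ_eq_map, List.map_cons, List.append_assoc,
      List.singleton_append]
    congr 1
    have h0 : PySem.Int.floordiv n ((10:Int)^(0:Nat)) = n := by
      rw [pow_zero, PySem.Int.floordiv_eq_ediv_of_pos (by norm_num), Int.ediv_one]
    rw [h0]
    rw [List.map_map]
    congr 1
    apply List.map_congr_left
    intro e _he
    simp only [Function.comp_apply]
    congr 2
    rw [fd_fd n (by norm_num) (by positivity)]
    congr 1
    rw [pow_succ]; ring

lemma final_eq (length Q R T : Int) (hL : 1 ≤ length) (hQ : 0 < Q) (hT : 0 < T)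
    (hlow : 3*T ≤ 3*Q+R) (hhigh : 4*Q+R ≤ 4*T)
    (hpins : ∀ i : Nat, i < length.toNat →
      PySem.Int.floordiv ((10:Int)^i*(3*Q+R)) T = PySem.Int.floordiv ((10:Int)^i*(4*Q+R)) T) :
    (List.range length.toNat).map (fun i => PySem.Int.toStr (digA Q R T i))
      = (pyDigitsLoop length.toNat
          (PySem.Int.floordiv ((10:Int)^(length.toNat-1)*(3*Q+R)) T) []).reverse := by
  rw [pyDigitsLoop_eq, List.nil_append]
  set L := length.toNat with hLdef
  have hL1 : 1 ≤ L := by omega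
  set N := PySem.Int.floordiv ((10:Int)^(L-1)*(3*Q+R)) T with hN
  apply List.ext_getElem
  · simp
  · intro i h1 h2
    simp only [List.getElem_map, List.getElem_range,
      List.getElem_reverse, List.length_map, List.length_range] at h1 h2 ⊢
    have hi : i < L := by simpa using h1
    -- RHS index is L-1-i
    have hNe : PySem.Int.floordiv N ((10:Int)^(L-1-i)) = PySem.Int.floordiv ((10:Int)^i*(3*Q+R)) T := by
      rw [hN, fd_shift _ _ hT (by omega)]
    rw [hNe]
    match i, hi with
    | 0, _ =>
      have hpin0 : PySem.Int.floordiv (3*Q+R) T = PySem.Int.floordiv (4*Q+R) T := by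
        have := hpins 0 (by omega); simpa using this
      have h3 := A0_eq_three hQ hT hlow hhigh hpin0
      simp only [digA, pow_zero, one_mul, h3]
      decide
    | p+1, hp =>
      have hfd10 : PySem.Int.floordiv (PySem.Int.floordiv ((10:Int)^(p+1)*(3*Q+R)) T) 10
          = PySem.Int.floordiv ((10:Int)^p*(3*Q+R)) T := by
        have := fd_shift (3*Q+R) T (i := p) (e := p+1) hT (by omega)
        have he : (10:Int)^(p+1-p) = 10 := by norm_num
        rw [he] at this
        exact this
      have hm := PySem.Int.floordiv_mul_add_mod (PySem.Int.floordiv ((10:Int)^(p+1)*(3*Q+R)) T) 10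
      simp only [digA]
      congr 1
      rw [hfd10] at hm
      omega

-- adding a multiple of the (positive) divisor does not change the remainder
lemma mod_add_mul_self (x q T : Int) (hT : 0 < T) :
    PySem.Int.mod (x + q*T) T = PySem.Int.mod x T := by
  rw [PySem.Int.mod_eq_emod_of_pos hT, PySem.Int.mod_eq_emod_of_pos hT, Int.add_mul_emod_self_right]

-- the remainder of a value already in [0, T) is itself
lemma mod_self_of_bounds {x T : Int} (h0 : 0 ≤ x) (hlt : x < T) :
    PySem.Int.mod x T = x := by
  rw [PySem.Int.mod_eq_emod_of_pos (by omega), Int.emod_eq_of_lt h0 hlt]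

-- fd_sub_mul in addition form
lemma fd_sub_mul' (a q T : Int) (hT : 0 < T) :
    PySem.Int.floordiv (a + q*T) T = PySem.Int.floordiv a T + q := by
  have h : a + q*T = a - (-q)*T := by ring
  rw [h, fd_sub_mul _ _ _ hT]; ring

-- a pinned floor at scale s forces the scaled bracket width below the divisor
lemma gate_of_pin {s Q R T : Int} (hT : 0 < T)
    (hpin : PySem.Int.floordiv (s*(3*Q+R)) T = PySem.Int.floordiv (s*(4*Q+R)) T) :
    s*Q < T := by
  have h3 := (PySem.Int.floordiv_eq_iff_of_pos hT).mp (rfl :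
    PySem.Int.floordiv (s*(3*Q+R)) T = PySem.Int.floordiv (s*(3*Q+R)) T)
  have h4 := (PySem.Int.floordiv_eq_iff_of_pos hT).mp hpin.symm
  have hsq : s*(4*Q+R) - s*(3*Q+R) = s*Q := by ring
  linarith [h3.1, h4.2]

-- B's remainder test: W + U < t ↔ the two floors agree (W = V % t, 0 ≤ U)
lemma pinW_iff {V U T : Int} (hT : 0 < T) (hU : 0 ≤ U) :
    (PySem.Int.mod V T + U < T ↔ PySem.Int.floordiv V T = PySem.Int.floordiv (V+U) T) := by
  have hVW := PySem.Int.floordiv_mul_add_mod V T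
  have hW0 := PySem.Int.mod_nonneg V hT
  have hWlt := PySem.Int.mod_lt V hT
  have hsplit : V + U = (PySem.Int.mod V T + U) + PySem.Int.floordiv V T * T := by linarith
  constructor
  · intro h
    rw [hsplit, fd_sub_mul' _ _ _ hT]
    have h0 : PySem.Int.floordiv (PySem.Int.mod V T + U) T = 0 := by
      rw [PySem.Int.floordiv_eq_iff_of_pos hT]; constructor <;> nlinarith
    omega
  · intro h
    by_contra hge
    rw [not_lt] at hge
    rw [hsplit, fd_sub_mul' _ _ _ hT] at h
    have h1 : 1 ≤ PySem.Int.floordiv (PySem.Int.mod V T + U) T := by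
      rw [PySem.Int.le_floordiv_iff_mul_le hT]; linarith
    omega

-- B's incremental remainder update equals the fresh remainder of the consumed state
lemma modstep {V W U T K : Int} (hT : 0 < T) (hK : 1 ≤ K) (hU0 : 0 ≤ U) (hUT : U < T)
    (hW : W = PySem.Int.mod V T) :
    (if (2*K+1)*T ≤ (2*K+1)*W + (K-1)*U then (2*K+1)*W + (K-1)*U - (2*K+1)*T
     else (2*K+1)*W + (K-1)*U)
      = PySem.Int.mod ((2*K+1)*V + (K-1)*U) ((2*K+1)*T) := by
  have hVW := PySem.Int.floordiv_mul_add_mod V T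
  have hW0 : 0 ≤ W := hW ▸ PySem.Int.mod_nonneg V hT
  have hWlt : W < T := hW ▸ PySem.Int.mod_lt V hT
  have hT' : (0:Int) < (2*K+1)*T := by nlinarith
  have hsplit : (2*K+1)*V + (K-1)*U
      = ((2*K+1)*W + (K-1)*U) + PySem.Int.floordiv V T * ((2*K+1)*T) := by
    rw [hW]; nlinarith [hVW]
  have hx0 : 0 ≤ (2*K+1)*W + (K-1)*U := by nlinarith
  have hx2 : (2*K+1)*W + (K-1)*U < 2*((2*K+1)*T) := by nlinarith
  rw [hsplit, mod_add_mul_self _ _ _ hT']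
  by_cases hc : (2*K+1)*T ≤ (2*K+1)*W + (K-1)*U
  · rw [if_pos hc]
    have h2 : (2*K+1)*W + (K-1)*U = ((2*K+1)*W + (K-1)*U - (2*K+1)*T) + 1*((2*K+1)*T) := by ring
    rw [h2, mod_add_mul_self _ _ _ hT', mod_self_of_bounds (by omega) (by omega)]
    ring
  · rw [if_neg hc, mod_self_of_bounds (by omega) (by omega)]

-- Phase-2 simulation (bracket already narrower than one digit unit): A's loop with j
-- digits emitted, at pure-consume state (Q,R,T,K) with pinned prefix c, equals B's
-- second loop carrying the incremental remainder W, fuel for fuel.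
set_option maxHeartbeats 1000000 in
lemma main2 (length : Int) (hL : 1 ≤ length) :
    ∀ M : Nat, ∀ (fuel ef j : Nat) (Q R T K c W : Int) (acc : List String),
    fuel + (length.toNat - j) ≤ M →
    0 < Q → 0 < T → 1 ≤ K →
    3*T ≤ 3*Q+R → 4*Q+R ≤ 4*T →
    (10:Int)^(length.toNat-1)*Q < T →
    W = PySem.Int.mod ((10:Int)^(length.toNat-1)*(3*Q+R)) T →
    j < length.toNat →
    length.toNat - j < ef →
    (∀ i : Nat, i < j →
      PySem.Int.floordiv ((10:Int)^i*(3*Q+R)) T = PySem.Int.floordiv ((10:Int)^i*(4*Q+R)) T) →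
    c = (if j = 0 then 0 else 10 * PySem.Int.floordiv ((10:Int)^(j-1)*(3*Q+R)) T) →
    acc = (List.range j).map (fun i => PySem.Int.toStr (digA Q R T i)) →
    find_piLoop length fuel ef ((10:Int)^j*Q) ((10:Int)^j*R - c*T) T K
        (PySem.Int.floordiv (3*((10:Int)^j*Q) + ((10:Int)^j*R - c*T)) T) (2*K+1) acc
      = find_pi_altLoop2 length fuel ((10:Int)^(length.toNat-1)*(3*Q+R)) W
          ((10:Int)^(length.toNat-1)*Q) T K := by
  intro M
  induction M with
  | zero =>
    intro fuel ef j Q R T K c W acc hM hQ hT hK hlow hhigh hgate hW hj hef hpins hc hacc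
    omega
  | succ M ih =>
    intro fuel ef j Q R T K c W acc hM hQ hT hK hlow hhigh hgate hW hj hef hpins hc hacc
    obtain ⟨e, rfl⟩ : ∃ e, ef = e + 1 := ⟨ef - 1, by omega⟩
    cases fuel with
    | zero => simp only [find_piLoop, find_pi_altLoop2]
    | succ F =>
      have hsc : (0:Int) < (10:Int)^(length.toNat-1) := by positivity
      have hq : (0:Int) < (10:Int)^j*Q := by positivity
      have hU0 : (0:Int) ≤ (10:Int)^(length.toNat-1)*Q := by positivity
      have h3q : 3*((10:Int)^j*Q) + ((10:Int)^j*R - c*T) = (10:Int)^j*(3*Q+R) - c*T := by ring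
      have h4q : 4*((10:Int)^j*Q) + ((10:Int)^j*R - c*T) = (10:Int)^j*(4*Q+R) - c*T := by ring
      have hn : PySem.Int.floordiv (3*((10:Int)^j*Q) + ((10:Int)^j*R - c*T)) T
          = PySem.Int.floordiv ((10:Int)^j*(3*Q+R)) T - c := by
        rw [h3q, fd_sub_mul _ _ _ hT]
      have hn4 : PySem.Int.floordiv (4*((10:Int)^j*Q) + ((10:Int)^j*R - c*T)) T
          = PySem.Int.floordiv ((10:Int)^j*(4*Q+R)) T - c := by
        rw [h4q, fd_sub_mul _ _ _ hT]
      have hcond := cond_iff ((10:Int)^j*Q) ((10:Int)^j*R - c*T) T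
        (PySem.Int.floordiv (3*((10:Int)^j*Q) + ((10:Int)^j*R - c*T)) T) hq hT rfl
      have hVU : (10:Int)^(length.toNat-1)*(3*Q+R) + (10:Int)^(length.toNat-1)*Q
          = (10:Int)^(length.toNat-1)*(4*Q+R) := by ring
      have hlenacc : acc.length = j := by rw [hacc]; simp
      simp only [find_piLoop]
      by_cases hpin : PySem.Int.floordiv ((10:Int)^j*(3*Q+R)) T
          = PySem.Int.floordiv ((10:Int)^j*(4*Q+R)) T
      · -- EMIT: the two floors agree at level j, A appends a digit
        rw [if_pos (hcond.mpr (by rw [hn4, hn, hpin]))]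
        have hdig : PySem.Int.floordiv (3*((10:Int)^j*Q) + ((10:Int)^j*R - c*T)) T
            = digA Q R T j := by
          rw [hn]
          cases j with
          | zero => simp [digA, hc]
          | succ p => simp only [hc, if_neg (Nat.succ_ne_zero p), Nat.add_sub_cancel, digA]
        have hlen' : ((acc ++ [PySem.Int.toStr
            (PySem.Int.floordiv (3*((10:Int)^j*Q) + ((10:Int)^j*R - c*T)) T)]).length : Int)
            = (j:Int) + 1 := by simp [hlenacc]
        by_cases hdone : j + 1 = length.toNat
        · -- last digit: A returns, B's remainder test also fires
          rw [if_pos (by rw [hlen']; omega)]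
          rw [find_pi_altLoop2]
          have hLj : length.toNat - 1 = j := by omega
          have hpinL : PySem.Int.floordiv ((10:Int)^(length.toNat-1)*(3*Q+R)) T
              = PySem.Int.floordiv ((10:Int)^(length.toNat-1)*(4*Q+R)) T := by
            rw [hLj]; exact hpin
          have hstop : W + (10:Int)^(length.toNat-1)*Q < T := by
            rw [hW]
            exact (pinW_iff hT hU0).mpr (by rw [hVU]; exact hpinL)
          rw [if_neg (by omega)]
          have hpins' : ∀ i : Nat, i < length.toNat →
              PySem.Int.floordiv ((10:Int)^i*(3*Q+R)) T
                = PySem.Int.floordiv ((10:Int)^i*(4*Q+R)) T := by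
            intro i hi
            rcases Nat.lt_or_ge i j with h | h
            · exact hpins i h
            · have : i = j := by omega
              subst this; exact hpin
          rw [← final_eq length Q R T hL hQ hT hlow hhigh hpins']
          rw [hacc, hdig, ← hdone, List.range_succ, List.map_append, List.map_cons, List.map_nil]
        · -- more digits to go: recurse with the same fuel
          rw [if_neg (by rw [hlen']; omega)]
          have e1 : 10*((10:Int)^j*Q) = (10:Int)^(j+1)*Q := by ring
          have e2 : 10*(((10:Int)^j*R - c*T) -
              PySem.Int.floordiv (3*((10:Int)^j*Q) + ((10:Int)^j*R - c*T)) T * T)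
              = (10:Int)^(j+1)*R - (10*PySem.Int.floordiv ((10:Int)^j*(3*Q+R)) T)*T := by
            rw [hn]; ring
          have e3 : PySem.Int.floordiv (10*(3*((10:Int)^j*Q) + ((10:Int)^j*R - c*T))) T
                - 10*PySem.Int.floordiv (3*((10:Int)^j*Q) + ((10:Int)^j*R - c*T)) T
              = PySem.Int.floordiv (3*((10:Int)^(j+1)*Q) + ((10:Int)^(j+1)*R
                - (10*PySem.Int.floordiv ((10:Int)^j*(3*Q+R)) T)*T)) T := by
            rw [emit_n _ _ _ _ hT]
            congr 1
            rw [hn]; ring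
          rw [e1, e2, e3, hacc, hdig]
          exact ih (F+1) e (j+1) Q R T K (10*PySem.Int.floordiv ((10:Int)^j*(3*Q+R)) T) W
            ((List.range j).map (fun i => PySem.Int.toStr (digA Q R T i))
              ++ [PySem.Int.toStr (digA Q R T j)])
            (by omega) hQ hT hK hlow hhigh hgate hW (by omega) (by omega)
            (by
              intro i hi
              rcases Nat.lt_or_ge i j with h | h
              · exact hpins i h
              · have : i = j := by omega
                subst this; exact hpin)
            (by simp only [if_neg (Nat.succ_ne_zero j), Nat.add_sub_cancel])
            (by rw [List.range_succ, List.map_append, List.map_cons, List.map_nil])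
      · -- CONSUME: the floors disagree, both sides absorb the next series term
        rw [if_neg (fun h => hpin (by have := hcond.mp h; rw [hn4, hn] at this; omega))]
        rw [if_neg (by rw [hlenacc]; omega)]
        rw [find_pi_altLoop2]
        have hnopinL : ¬ PySem.Int.floordiv ((10:Int)^(length.toNat-1)*(3*Q+R)) T
            = PySem.Int.floordiv ((10:Int)^(length.toNat-1)*(4*Q+R)) T :=
          fun hEq => hpin (pin_mono hT (by omega) hEq)
        rw [if_pos (by
          by_contra hlt
          rw [not_le] at hlt
          apply hnopinL
          rw [← hVU]
          exact (pinW_iff hT hU0).mp (by rw [← hW]; omega))]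
        -- rewrite A's consumed state into the canonical invariant shape
        have f1 : ((10:Int)^j*Q)*K = (10:Int)^j*(Q*K) := by ring
        have f2 : (2*((10:Int)^j*Q) + ((10:Int)^j*R - c*T))*(2*K+1)
            = (10:Int)^j*((4*K+2)*Q+(2*K+1)*R) - c*((2*K+1)*T) := by ring
        have f3 : T*(2*K+1) = (2*K+1)*T := by ring
        have f4 : ((10:Int)^j*Q)*(7*K+2) + ((10:Int)^j*R - c*T)*(2*K+1)
            = 3*((10:Int)^j*(Q*K)) + ((10:Int)^j*((4*K+2)*Q+(2*K+1)*R) - c*((2*K+1)*T)) := by ring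
        have f5 : 2*K+1+2 = 2*(K+1)+1 := by ring
        rw [f1, f2, f3, f4, f5]
        -- rewrite B's consumed state likewise
        have g1 : (2*K+1)*((10:Int)^(length.toNat-1)*(3*Q+R)) + (K-1)*((10:Int)^(length.toNat-1)*Q)
            = (10:Int)^(length.toNat-1)*(3*(Q*K)+((4*K+2)*Q+(2*K+1)*R)) := by ring
        have g2 : K*((10:Int)^(length.toNat-1)*Q) = (10:Int)^(length.toNat-1)*(Q*K) := by ring
        have hT' : (0:Int) < (2*K+1)*T := by nlinarith
        have hgate' : (10:Int)^(length.toNat-1)*(Q*K) < (2*K+1)*T := by nlinarith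
        have hW' : (if (2*K+1)*T ≤ (2*K+1)*W + (K-1)*((10:Int)^(length.toNat-1)*Q)
              then (2*K+1)*W + (K-1)*((10:Int)^(length.toNat-1)*Q) - (2*K+1)*T
              else (2*K+1)*W + (K-1)*((10:Int)^(length.toNat-1)*Q))
            = PySem.Int.mod ((10:Int)^(length.toNat-1)*(3*(Q*K)+((4*K+2)*Q+(2*K+1)*R)))
                ((2*K+1)*T) := by
          rw [← g1]
          exact modstep hT hK hU0 hgate hW
        rw [g1, g2, hW']
        have hpersist : ∀ i : Nat, i < j →
            (PySem.Int.floordiv ((10:Int)^i*(3*(Q*K)+((4*K+2)*Q+(2*K+1)*R))) ((2*K+1)*T)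
              = PySem.Int.floordiv ((10:Int)^i*(3*Q+R)) T ∧
             PySem.Int.floordiv ((10:Int)^i*(4*(Q*K)+((4*K+2)*Q+(2*K+1)*R))) ((2*K+1)*T)
              = PySem.Int.floordiv ((10:Int)^i*(4*Q+R)) T) := by
          intro i hi
          exact persist ((10:Int)^i) Q R T K (by positivity) hQ hT hK (hpins i hi)
        exact ih F (length.toNat+1) j (Q*K) ((4*K+2)*Q+(2*K+1)*R) ((2*K+1)*T) (K+1) c
          (PySem.Int.mod ((10:Int)^(length.toNat-1)*(3*(Q*K)+((4*K+2)*Q+(2*K+1)*R))) ((2*K+1)*T))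
          acc
          (by omega) (by positivity) hT' (by omega)
          (by nlinarith [mul_le_mul_of_nonneg_left hlow (show (0:Int) ≤ 2*K+1 by omega),
            mul_nonneg (show (0:Int) ≤ K-1 by omega) hQ.le])
          (by nlinarith [mul_le_mul_of_nonneg_left hhigh (show (0:Int) ≤ 2*K+1 by omega)])
          hgate' rfl hj (by omega)
          (by
            intro i hi
            rw [(hpersist i hi).1, (hpersist i hi).2]
            exact hpins i hi)
          (by
            cases j with
            | zero => simpa using hc
            | succ p =>
              rw [hc]
              simp only [if_neg (Nat.succ_ne_zero p), Nat.add_sub_cancel]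
              rw [(hpersist p (by omega)).1])
          (by
            rw [hacc]
            apply List.map_congr_left
            intro i hi
            have hi' : i < j := by simpa using hi
            congr 1
            cases i with
            | zero =>
              have h1 := (persist 1 Q R T K (by norm_num) hQ hT hK
                (by simpa using hpins 0 hi')).1
              simp only [one_mul] at h1
              simp only [digA]
              omega
            | succ p =>
              simp only [digA]
              rw [(hpersist (p+1) hi').1, (hpersist p (by omega)).1])


-- Phase-1 simulation (bracket still wide): A's loop equals B's first loop; when the
-- bracket narrows, control passes to the phase-2 simulation.
set_option maxHeartbeats 1000000 in
lemma main1 (length : Int) (hL : 1 ≤ length) :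
    ∀ M : Nat, ∀ (fuel ef j : Nat) (Q R T K c : Int) (acc : List String),
    fuel + (length.toNat - j) ≤ M →
    0 < Q → 0 < T → 1 ≤ K →
    3*T ≤ 3*Q+R → 4*Q+R ≤ 4*T →
    T ≤ (10:Int)^(length.toNat-1)*Q →
    j < length.toNat →
    length.toNat - j < ef →
    (∀ i : Nat, i < j →
      PySem.Int.floordiv ((10:Int)^i*(3*Q+R)) T = PySem.Int.floordiv ((10:Int)^i*(4*Q+R)) T) →
    c = (if j = 0 then 0 else 10 * PySem.Int.floordiv ((10:Int)^(j-1)*(3*Q+R)) T) →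
    acc = (List.range j).map (fun i => PySem.Int.toStr (digA Q R T i)) →
    find_piLoop length fuel ef ((10:Int)^j*Q) ((10:Int)^j*R - c*T) T K
        (PySem.Int.floordiv (3*((10:Int)^j*Q) + ((10:Int)^j*R - c*T)) T) (2*K+1) acc
      = find_pi_altLoop1 length fuel ((10:Int)^(length.toNat-1)*Q)
          ((10:Int)^(length.toNat-1)*(3*Q+R)) T K := by
  intro M
  induction M with
  | zero =>
    intro fuel ef j Q R T K c acc hM hQ hT hK hlow hhigh hgate hj hef hpins hc hacc
    omega
  | succ M ih =>
    intro fuel ef j Q R T K c acc hM hQ hT hK hlow hhigh hgate hj hef hpins hc hacc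
    obtain ⟨e, rfl⟩ : ∃ e, ef = e + 1 := ⟨ef - 1, by omega⟩
    cases fuel with
    | zero => simp only [find_piLoop, find_pi_altLoop1]
    | succ F =>
      have hq : (0:Int) < (10:Int)^j*Q := by positivity
      have h3q : 3*((10:Int)^j*Q) + ((10:Int)^j*R - c*T) = (10:Int)^j*(3*Q+R) - c*T := by ring
      have h4q : 4*((10:Int)^j*Q) + ((10:Int)^j*R - c*T) = (10:Int)^j*(4*Q+R) - c*T := by ring
      have hn : PySem.Int.floordiv (3*((10:Int)^j*Q) + ((10:Int)^j*R - c*T)) T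
          = PySem.Int.floordiv ((10:Int)^j*(3*Q+R)) T - c := by
        rw [h3q, fd_sub_mul _ _ _ hT]
      have hn4 : PySem.Int.floordiv (4*((10:Int)^j*Q) + ((10:Int)^j*R - c*T)) T
          = PySem.Int.floordiv ((10:Int)^j*(4*Q+R)) T - c := by
        rw [h4q, fd_sub_mul _ _ _ hT]
      have hcond := cond_iff ((10:Int)^j*Q) ((10:Int)^j*R - c*T) T
        (PySem.Int.floordiv (3*((10:Int)^j*Q) + ((10:Int)^j*R - c*T)) T) hq hT rfl
      have hlenacc : acc.length = j := by rw [hacc]; simp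
      simp only [find_piLoop]
      by_cases hpin : PySem.Int.floordiv ((10:Int)^j*(3*Q+R)) T
          = PySem.Int.floordiv ((10:Int)^j*(4*Q+R)) T
      · -- EMIT: possible for early digits while the bracket is still wide
        rw [if_pos (hcond.mpr (by rw [hn4, hn, hpin]))]
        have hdig : PySem.Int.floordiv (3*((10:Int)^j*Q) + ((10:Int)^j*R - c*T)) T
            = digA Q R T j := by
          rw [hn]
          cases j with
          | zero => simp [digA, hc]
          | succ p => simp only [hc, if_neg (Nat.succ_ne_zero p), Nat.add_sub_cancel, digA]
        have hlen' : ((acc ++ [PySem.Int.toStr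
            (PySem.Int.floordiv (3*((10:Int)^j*Q) + ((10:Int)^j*R - c*T)) T)]).length : Int)
            = (j:Int) + 1 := by simp [hlenacc]
        by_cases hdone : j + 1 = length.toNat
        · -- cannot happen: pinning the last digit forces the bracket below one unit
          exfalso
          have hLj : length.toNat - 1 = j := by omega
          have hpinL : PySem.Int.floordiv ((10:Int)^(length.toNat-1)*(3*Q+R)) T
              = PySem.Int.floordiv ((10:Int)^(length.toNat-1)*(4*Q+R)) T := by
            rw [hLj]; exact hpin
          linarith [gate_of_pin hT hpinL]
        · rw [if_neg (by rw [hlen']; omega)]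
          have e1 : 10*((10:Int)^j*Q) = (10:Int)^(j+1)*Q := by ring
          have e2 : 10*(((10:Int)^j*R - c*T) -
              PySem.Int.floordiv (3*((10:Int)^j*Q) + ((10:Int)^j*R - c*T)) T * T)
              = (10:Int)^(j+1)*R - (10*PySem.Int.floordiv ((10:Int)^j*(3*Q+R)) T)*T := by
            rw [hn]; ring
          have e3 : PySem.Int.floordiv (10*(3*((10:Int)^j*Q) + ((10:Int)^j*R - c*T))) T
                - 10*PySem.Int.floordiv (3*((10:Int)^j*Q) + ((10:Int)^j*R - c*T)) T
              = PySem.Int.floordiv (3*((10:Int)^(j+1)*Q) + ((10:Int)^(j+1)*R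
                - (10*PySem.Int.floordiv ((10:Int)^j*(3*Q+R)) T)*T)) T := by
            rw [emit_n _ _ _ _ hT]
            congr 1
            rw [hn]; ring
          rw [e1, e2, e3, hacc, hdig]
          exact ih (F+1) e (j+1) Q R T K (10*PySem.Int.floordiv ((10:Int)^j*(3*Q+R)) T)
            ((List.range j).map (fun i => PySem.Int.toStr (digA Q R T i))
              ++ [PySem.Int.toStr (digA Q R T j)])
            (by omega) hQ hT hK hlow hhigh hgate (by omega) (by omega)
            (by
              intro i hi
              rcases Nat.lt_or_ge i j with h | h
              · exact hpins i h
              · have : i = j := by omega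
                subst this; exact hpin)
            (by simp only [if_neg (Nat.succ_ne_zero j), Nat.add_sub_cancel])
            (by rw [List.range_succ, List.map_append, List.map_cons, List.map_nil])
      · -- CONSUME: both sides absorb the next series term
        rw [if_neg (fun h => hpin (by have := hcond.mp h; rw [hn4, hn] at this; omega))]
        rw [if_neg (by rw [hlenacc]; omega)]
        rw [find_pi_altLoop1, if_pos hgate]
        have f1 : ((10:Int)^j*Q)*K = (10:Int)^j*(Q*K) := by ring
        have f2 : (2*((10:Int)^j*Q) + ((10:Int)^j*R - c*T))*(2*K+1)
            = (10:Int)^j*((4*K+2)*Q+(2*K+1)*R) - c*((2*K+1)*T) := by ring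
        have f3 : T*(2*K+1) = (2*K+1)*T := by ring
        have f4 : ((10:Int)^j*Q)*(7*K+2) + ((10:Int)^j*R - c*T)*(2*K+1)
            = 3*((10:Int)^j*(Q*K)) + ((10:Int)^j*((4*K+2)*Q+(2*K+1)*R) - c*((2*K+1)*T)) := by ring
        have f5 : 2*K+1+2 = 2*(K+1)+1 := by ring
        rw [f1, f2, f3, f4, f5]
        have g1 : (2*K+1)*((10:Int)^(length.toNat-1)*(3*Q+R)) + (K-1)*((10:Int)^(length.toNat-1)*Q)
            = (10:Int)^(length.toNat-1)*(3*(Q*K)+((4*K+2)*Q+(2*K+1)*R)) := by ring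
        have g2 : K*((10:Int)^(length.toNat-1)*Q) = (10:Int)^(length.toNat-1)*(Q*K) := by ring
        rw [g1, g2]
        have hT' : (0:Int) < (2*K+1)*T := by nlinarith
        have hQ' : (0:Int) < Q*K := by positivity
        have hlow' : 3*((2*K+1)*T) ≤ 3*(Q*K)+((4*K+2)*Q+(2*K+1)*R) := by
          nlinarith [mul_le_mul_of_nonneg_left hlow (show (0:Int) ≤ 2*K+1 by omega),
            mul_nonneg (show (0:Int) ≤ K-1 by omega) hQ.le]
        have hhigh' : 4*(Q*K)+((4*K+2)*Q+(2*K+1)*R) ≤ 4*((2*K+1)*T) := by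
          nlinarith [mul_le_mul_of_nonneg_left hhigh (show (0:Int) ≤ 2*K+1 by omega)]
        have hpersist : ∀ i : Nat, i < j →
            (PySem.Int.floordiv ((10:Int)^i*(3*(Q*K)+((4*K+2)*Q+(2*K+1)*R))) ((2*K+1)*T)
              = PySem.Int.floordiv ((10:Int)^i*(3*Q+R)) T ∧
             PySem.Int.floordiv ((10:Int)^i*(4*(Q*K)+((4*K+2)*Q+(2*K+1)*R))) ((2*K+1)*T)
              = PySem.Int.floordiv ((10:Int)^i*(4*Q+R)) T) := by
          intro i hi
          exact persist ((10:Int)^i) Q R T K (by positivity) hQ hT hK (hpins i hi)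
        have hpins' : ∀ i : Nat, i < j →
            PySem.Int.floordiv ((10:Int)^i*(3*(Q*K)+((4*K+2)*Q+(2*K+1)*R))) ((2*K+1)*T)
              = PySem.Int.floordiv ((10:Int)^i*(4*(Q*K)+((4*K+2)*Q+(2*K+1)*R))) ((2*K+1)*T) := by
          intro i hi
          rw [(hpersist i hi).1, (hpersist i hi).2]
          exact hpins i hi
        have hc' : c = (if j = 0 then 0
            else 10 * PySem.Int.floordiv ((10:Int)^(j-1)*(3*(Q*K)+((4*K+2)*Q+(2*K+1)*R)))
              ((2*K+1)*T)) := by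
          cases j with
          | zero => simpa using hc
          | succ p =>
            rw [hc]
            simp only [if_neg (Nat.succ_ne_zero p), Nat.add_sub_cancel]
            rw [(hpersist p (by omega)).1]
        have hacc' : acc = (List.range j).map
            (fun i => PySem.Int.toStr (digA (Q*K) ((4*K+2)*Q+(2*K+1)*R) ((2*K+1)*T) i)) := by
          rw [hacc]
          apply List.map_congr_left
          intro i hi
          have hi' : i < j := by simpa using hi
          congr 1
          cases i with
          | zero =>
            have h1 := (persist 1 Q R T K (by norm_num) hQ hT hK
              (by simpa using hpins 0 hi')).1
            simp only [one_mul] at h1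
            simp only [digA]
            omega
          | succ p =>
            simp only [digA]
            rw [(hpersist (p+1) hi').1, (hpersist p (by omega)).1]
        by_cases hg' : (10:Int)^(length.toNat-1)*(Q*K) < (2*K+1)*T
        · -- the bracket just became narrow: hand over to the phase-2 simulation
          cases F with
          | zero => simp only [find_piLoop, find_pi_altLoop1]
          | succ F' =>
            rw [find_pi_altLoop1, if_neg (by rw [not_le]; exact hg')]
            exact main2 length hL (F'+1 + (length.toNat - j)) (F'+1) (length.toNat+1) j
              (Q*K) ((4*K+2)*Q+(2*K+1)*R) ((2*K+1)*T) (K+1) c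
              (PySem.Int.mod ((10:Int)^(length.toNat-1)*(3*(Q*K)+((4*K+2)*Q+(2*K+1)*R)))
                ((2*K+1)*T)) acc
              (le_refl _) hQ' hT' (by omega) hlow' hhigh' hg' rfl hj (by omega)
              hpins' hc' hacc'
        · -- the bracket is still wide: stay in phase 1
          rw [not_lt] at hg'
          exact ih F (length.toNat+1) j (Q*K) ((4*K+2)*Q+(2*K+1)*R) ((2*K+1)*T) (K+1) c acc
            (by omega) hQ' hT' (by omega) hlow' hhigh' hg' hj (by omega)
            hpins' hc' hacc'


-- ===== VERDICT (by name: the statement is the Claim_ definition above) =====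
theorem find_pi_spec : Claim_equal_find_pi := by
  intro length _hdom hpre
  unfold Spec_find_pi
  by_cases h0 : length = 0
  · subst h0
    show find_pi 0 = find_pi_alt 0
    unfold find_pi find_pi_alt
    norm_num
    show find_piLoop 0 (15+1) (0+1) 1 0 1 1 3 3 [] = []
    rw [find_piLoop]
    norm_num
  · have hL : 1 ≤ length := by
      unfold Pre_find_pi at hpre; omega
    unfold find_pi find_pi_alt
    rw [if_neg (by omega)]
    have hmain := main1 length hL ((10*length+16).toNat + length.toNat)
      (10*length+16).toNat (length.toNat+1) 0 1 0 1 1 0 []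
      (by omega) (by norm_num) (by norm_num) (by norm_num) (by norm_num) (by norm_num)
      (by rw [mul_one]; exact one_le_pow₀ (by norm_num)) (by omega) (by omega)
      (by intro i hi; omega) (by simp) (by simp)
    norm_num at hmain
    rw [show (3:Int)*(10:Int)^(length.toNat-1) = (10:Int)^(length.toNat-1)*3 from by ring]
    exact hmain
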